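-- pv_equiv track=rewrite | github.com/aruokoniemi/swmaintenance_assignment1a | fibonacci.py | getFibonacciSeries
-- ===== SOURCE A (Python) =====
-- def getFibonacciSeries(startingNumber, seriesLength):
--     a, b = 0, 1
--     series = []
--
--     while len(series) < seriesLength:
--         if a > startingNumber:
--             series.append(a)
--         a, b = b, a+b
--
--     return series
-- ===== SOURCE B (Python) =====
-- def getFibonacciSeries(startingNumber, seriesLength):
--     # Index-based algorithm: each output element F(n) is computed independently
--     # by fast doubling; no running pair generates the output.
--     def fib(n):
--         # returns (F(n), F(n+1)) via the fast-doubling identities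
--         if n == 0:
--             return (0, 1)
--         f, g = fib(n >> 1)
--         c = f * (2 * g - f)
--         d = f * f + g * g
--         if n & 1:
--             return (d, c + d)
--         return (c, d)
--
--     # first index k with F(k) > startingNumber; the kept terms are then the
--     # contiguous index range k .. k+seriesLength-1
--     k, a, b = 0, 0, 1
--     while a <= startingNumber:
--         a, b = b, a + b
--         k += 1
--     return [fib(k + i)[0] for i in range(seriesLength)]
-- ===== Notes on version B (the rewrite author's own statement) =====
-- stated objective: alternative
-- what changed: Replaces A's running-pair generation loop (carrying (a,b) state and an in-loop threshold branch) by an index-based algorithm: each Fibonacci number F(n) is computed independently by fast doubling, the first index k with F(k) > startingNumber is located, and the result is the comprehension [F(k+i) for i in range(seriesLength)] over the contiguous index range.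
import Mathlib
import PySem

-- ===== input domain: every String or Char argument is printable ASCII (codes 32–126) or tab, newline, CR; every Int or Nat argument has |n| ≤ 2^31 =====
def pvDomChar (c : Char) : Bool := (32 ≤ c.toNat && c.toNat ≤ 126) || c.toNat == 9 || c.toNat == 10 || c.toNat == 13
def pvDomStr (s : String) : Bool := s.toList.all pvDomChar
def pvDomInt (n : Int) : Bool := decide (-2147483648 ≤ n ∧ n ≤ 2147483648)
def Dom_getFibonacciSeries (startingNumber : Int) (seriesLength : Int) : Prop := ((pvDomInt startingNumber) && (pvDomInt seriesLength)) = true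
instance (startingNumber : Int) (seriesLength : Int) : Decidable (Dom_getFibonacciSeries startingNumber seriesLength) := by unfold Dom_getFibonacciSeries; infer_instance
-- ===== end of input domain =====

-- B replaces A's running-pair generation loop by an index-based algorithm: each output
-- element F(n) is computed independently by fast doubling and the result is a
-- comprehension over the contiguous index range; objective: alternative.

-- ===== PORT A =====
-- A's while loop as structural recursion on the state (a, b, series).  The invariant
-- arguments (0 ≤ a, 1 ≤ b, a ≤ b, b ≤ 2a+1) hold of Python's loop state throughout and
-- are carried only to justify termination; the computation is A's step for step.
def goA (sN L a b : Int) (series : List Int)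
    (ha : 0 ≤ a) (hb1 : 1 ≤ b) (hab : a ≤ b) (hb : b ≤ 2*a+1) : List Int :=
  if (series.length : Int) < L then
    goA sN L b (a+b) (if a > sN then series ++ [a] else series)
      (by omega) (by omega) (by omega) (by omega)
  else series
termination_by ((L - series.length).toNat, (3*sN + 2 - (a+b)).toNat)
decreasing_by
  split
  · apply Prod.Lex.left; simp; omega
  · apply Prod.Lex.right; omega

def getFibonacciSeries (startingNumber : Int) (seriesLength : Int) : List Int :=
  goA startingNumber seriesLength 0 1 [] (by omega) (by omega) (by omega) (by omega)

-- ===== PORT B =====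
-- B's inner `fib`: fast doubling, returns (F(n), F(n+1)); n >> 1 is n / 2, n & 1 is n % 2.
-- (Python's fib is only ever called on nonnegative k + i, so Nat indices are exact.)
def fibFD : Nat → Int × Int
  | 0 => (0, 1)
  | n+1 =>
    let p := fibFD ((n+1) / 2)
    let f := p.1
    let g := p.2
    let c := f * (2 * g - f)
    let d := f * f + g * g
    if (n+1) % 2 = 1 then (d, c + d) else (c, d)
termination_by n => n
decreasing_by omega

-- B's `while a <= startingNumber: a, b = b, a+b; k += 1`, counting the skipped
-- prefix; same invariant arguments as goA, carried only for termination.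
def skipK (sN : Int) (k : Nat) (a b : Int)
    (ha : 0 ≤ a) (hb1 : 1 ≤ b) (hab : a ≤ b) (hb : b ≤ 2*a+1) : Nat :=
  if a ≤ sN then skipK sN (k+1) b (a+b) (by omega) (by omega) (by omega) (by omega)
  else k
termination_by (3*sN + 2 - (a+b)).toNat
decreasing_by omega

-- `[fib(k + i)[0] for i in range(seriesLength)]` (range(n) is empty for n ≤ 0,
-- which Int.toNat models exactly).
def getFibonacciSeries_alt (startingNumber : Int) (seriesLength : Int) : List Int :=
  (List.range seriesLength.toNat).map
    (fun i => (fibFD (skipK startingNumber 0 0 1 (by omega) (by omega) (by omega) (by omega) + i)).1)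

-- ===== PRECONDITION & SPEC =====
def Spec_getFibonacciSeries (startingNumber : Int) (seriesLength : Int) (out : List Int) : Prop := out = getFibonacciSeries_alt startingNumber seriesLength
instance (startingNumber : Int) (seriesLength : Int) (out : List Int) : Decidable (Spec_getFibonacciSeries startingNumber seriesLength out) := by unfold Spec_getFibonacciSeries; infer_instance

-- ===== CLAIM (what is proved, stated in full; the proofs are below) =====
def Claim_equal_getFibonacciSeries : Prop := ∀ (startingNumber : Int) (seriesLength : Int), Dom_getFibonacciSeries startingNumber seriesLength → Spec_getFibonacciSeries startingNumber seriesLength (getFibonacciSeries startingNumber seriesLength)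

-- ===== LEMMAS AND PROOFS =====

-- fast-doubling identities for Fibonacci, over Int
theorem fib_dbl (m : Nat) : ((Nat.fib (2*m) : Int)) = (Nat.fib m : Int) * (2*(Nat.fib (m+1) : Int) - (Nat.fib m : Int)) := by
  have hle : Nat.fib m ≤ 2 * Nat.fib (m+1) := by
    have := Nat.fib_le_fib_succ (n := m); omega
  rw [Nat.fib_two_mul, Nat.cast_mul, Nat.cast_sub hle]
  push_cast; ring

theorem fib_dbl1 (m : Nat) : ((Nat.fib (2*m+1) : Int)) = (Nat.fib (m+1) : Int)^2 + (Nat.fib m : Int)^2 := by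
  rw [Nat.fib_two_mul_add_one]; push_cast; ring

-- B's fib really computes (F(n), F(n+1))
theorem fibFD_eq (n : Nat) : fibFD n = ((Nat.fib n : Int), (Nat.fib (n+1) : Int)) := by
  induction n using Nat.strong_induction_on with
  | _ n ih =>
    match n with
    | 0 => simp [fibFD]
    | Nat.succ n =>
      have ihm : fibFD ((n+1)/2) = ((Nat.fib ((n+1)/2) : Int), (Nat.fib ((n+1)/2+1) : Int)) :=
        ih _ (by omega)
      rw [fibFD]
      simp only [ihm]
      simp only [Nat.succ_eq_add_one]
      rcases Nat.even_or_odd (n+1) with ⟨m, hm⟩ | ⟨m, hm⟩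
      · have h2 : (n+1)/2 = m := by omega
        rw [show n+1 = 2*m by omega] at h2 ⊢
        simp only [h2]
        rw [if_neg (show ¬ 2*m % 2 = 1 by omega), Prod.mk.injEq]
        exact ⟨by rw [fib_dbl], by rw [fib_dbl1]; ring⟩
      · have h2 : (n+1)/2 = m := by omega
        rw [show n+1 = 2*m+1 by omega] at h2 ⊢
        simp only [h2]
        rw [if_pos (show (2*m+1) % 2 = 1 by omega), Prod.mk.injEq]
        refine ⟨by rw [fib_dbl1]; ring, ?_⟩
        have hc : (Nat.fib (2*m+1+1) : Int) = (Nat.fib (2*m) : Int) + (Nat.fib (2*m+1) : Int) := by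
          rw [show 2*m+1+1 = 2*m+2 from rfl, Nat.fib_add_two]; push_cast; ring
        rw [hc, fib_dbl, fib_dbl1]; ring

theorem fib_succ_pos (k : Nat) : 1 ≤ Nat.fib (k+1) :=
  Nat.fib_pos.mpr (by omega)

theorem fib_succ_le (k : Nat) : Nat.fib (k+1) ≤ 2 * Nat.fib k + 1 := by
  cases k with
  | zero => simp [Nat.fib]
  | succ k =>
    rw [Nat.fib_add_two]
    have := Nat.fib_le_fib_succ (n := k)
    omega

-- canonical proofs of the invariant arguments at state (F i, F(i+1))
theorem pfa (i : Nat) : (0:Int) ≤ (Nat.fib i : Int) := by positivity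
theorem pfb (i : Nat) : (1:Int) ≤ (Nat.fib (i+1) : Int) := by exact_mod_cast fib_succ_pos i
theorem pfc (i : Nat) : ((Nat.fib i : Int)) ≤ (Nat.fib (i+1) : Int) := by
  exact_mod_cast Nat.fib_le_fib_succ
theorem pfd (i : Nat) : ((Nat.fib (i+1) : Int)) ≤ 2*(Nat.fib i : Int)+1 := by
  exact_mod_cast fib_succ_le i

-- goA / skipK depend on their numeric arguments only (proofs are irrelevant)
theorem goA_congr (sN L a a' b b' : Int) (series : List Int)
    (hA : a = a') (hB : b = b')
    (p1 : 0 ≤ a) (p2 : 1 ≤ b) (p3 : a ≤ b) (p4 : b ≤ 2*a+1)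
    (q1 : 0 ≤ a') (q2 : 1 ≤ b') (q3 : a' ≤ b') (q4 : b' ≤ 2*a'+1) :
    goA sN L a b series p1 p2 p3 p4 = goA sN L a' b' series q1 q2 q3 q4 := by
  subst hA; subst hB; rfl

theorem skipK_congr (sN : Int) (k : Nat) (a a' b b' : Int)
    (hA : a = a') (hB : b = b')
    (p1 : 0 ≤ a) (p2 : 1 ≤ b) (p3 : a ≤ b) (p4 : b ≤ 2*a+1)
    (q1 : 0 ≤ a') (q2 : 1 ≤ b') (q3 : a' ≤ b') (q4 : b' ≤ 2*a'+1) :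
    skipK sN k a b p1 p2 p3 p4 = skipK sN k a' b' q1 q2 q3 q4 := by
  subst hA; subst hB; rfl

theorem fib_step (i : Nat) :
    (Nat.fib i : Int) + (Nat.fib (i+1) : Int) = (Nat.fib (i+1+1) : Int) := by
  rw [Nat.fib_add_two]; push_cast; ring

-- Once the current term F i exceeds the threshold, A's loop appends every term,
-- producing exactly the next (L - len series) Fibonacci numbers by index.
theorem collect_eq (sN L : Int) : ∀ (n : Nat) (i : Nat) (series : List Int),
    (L - series.length).toNat = n → sN < (Nat.fib i : Int) →
    goA sN L (Nat.fib i) (Nat.fib (i+1)) series (pfa i) (pfb i) (pfc i) (pfd i)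
      = series ++ (List.range n).map (fun j => ((Nat.fib (i+j) : Int))) := by
  intro n
  induction n with
  | zero =>
    intro i series hn hgt
    rw [goA, if_neg (by omega)]
    simp
  | succ n ih =>
    intro i series hn hgt
    rw [goA, if_pos (by omega), if_pos (by exact_mod_cast hgt)]
    rw [goA_congr sN L _ (Nat.fib (i+1)) _ (Nat.fib (i+1+1))
      (series ++ [(Nat.fib i : Int)]) rfl (fib_step i)
      _ _ _ _ (pfa (i+1)) (pfb (i+1)) (pfc (i+1)) (pfd (i+1))]
    rw [ih (i+1) (series ++ [(Nat.fib i : Int)]) (by simp; omega) (by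
      have := pfc i; omega)]
    rw [List.range_succ_eq_map]
    simp only [List.map_cons, List.map_map, List.append_assoc, List.singleton_append,
      Nat.add_zero]
    congr 2
    apply List.map_congr_left
    intro j _
    simp only [Function.comp_apply]
    congr 2
    omega

-- A's loop from state (F i, F(i+1)) equals the index-range comprehension starting
-- at the first index ≥ i whose Fibonacci number exceeds the threshold (= skipK from i).
theorem skip_eq (sN L : Int) (hL : 0 < L) : ∀ (n : Nat) (i : Nat),
    (3*sN + 2 - ((Nat.fib i : Int) + (Nat.fib (i+1) : Int))).toNat = n →
    goA sN L (Nat.fib i) (Nat.fib (i+1)) [] (pfa i) (pfb i) (pfc i) (pfd i)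
      = (List.range L.toNat).map
          (fun j => ((Nat.fib (skipK sN i (Nat.fib i) (Nat.fib (i+1)) (pfa i) (pfb i) (pfc i) (pfd i) + j) : Int))) := by
  intro n
  induction n using Nat.strong_induction_on with
  | _ n ih =>
    intro i hn
    by_cases h : (Nat.fib i : Int) ≤ sN
    · rw [goA, if_pos (by simpa using hL), if_neg (by omega)]
      rw [goA_congr sN L _ (Nat.fib (i+1)) _ (Nat.fib (i+1+1)) []
        rfl (fib_step i)
        _ _ _ _ (pfa (i+1)) (pfb (i+1)) (pfc (i+1)) (pfd (i+1))]
      rw [skipK, if_pos h]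
      rw [skipK_congr sN (i+1) _ (Nat.fib (i+1)) _ (Nat.fib (i+1+1))
        rfl (fib_step i)
        _ _ _ _ (pfa (i+1)) (pfb (i+1)) (pfc (i+1)) (pfd (i+1))]
      refine ih _ ?_ (i+1) rfl
      have h1 := pfa i
      have h2 := pfb i
      have h3 := fib_step i
      have h4 := pfb (i+1)
      have h5 := pfd i
      omega
    · rw [skipK, if_neg h]
      have := collect_eq sN L L.toNat i [] (by simp) (by omega)
      simpa using this

-- ===== VERDICT (by name: the statement is the Claim_ definition above) =====
theorem getFibonacciSeries_spec : Claim_equal_getFibonacciSeries := by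
  intro sN L _hDom
  unfold Spec_getFibonacciSeries getFibonacciSeries getFibonacciSeries_alt
  by_cases hL : 0 < L
  · rw [goA_congr sN L 0 (Nat.fib 0) 1 (Nat.fib (0+1)) [] (by simp) (by simp)
      _ _ _ _ (pfa 0) (pfb 0) (pfc 0) (pfd 0)]
    rw [skip_eq sN L hL _ 0 rfl]
    apply List.map_congr_left
    intro j _
    rw [skipK_congr sN 0 0 (Nat.fib 0) 1 (Nat.fib (0+1)) (by simp) (by simp)
      _ _ _ _ (pfa 0) (pfb 0) (pfc 0) (pfd 0), fibFD_eq]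
  · rw [goA, if_neg (by simpa using hL)]
    rw [show L.toNat = 0 by omega]
    simp
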